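-- pv_equiv track=rewrite | github.com/WasayRizwani/Software-Engineeing-2 | i190423_A.py | CreateString
-- ===== SOURCE A (Python) =====
-- def CreateString(matrix,string1):
--     row=0
--     for character in string1:
--         check=matrix[row].count(character)
--         if check:
--             matrix[row].remove(character)
--         else:
--             return "NO"
--         row=(row+1)%len(matrix)
--     return "YES"
-- ===== SOURCE B (Python) =====
-- def CreateString(matrix, string1):
--     # Note: unlike A, this implementation does not mutate `matrix`;
--     # the equivalence claimed is about the return value only.
--     if not string1:
--         return "YES"
--     n = len(matrix)
--     buckets = [[] for _ in range(n)]
--     for i, ch in enumerate(string1):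
--         buckets[i % n].append(ch)
--     for r, need in enumerate(buckets):
--         have = matrix[r]
--         for ch in set(need):
--             if need.count(ch) > have.count(ch):
--                 return "NO"
--     return "YES"
-- ===== Notes on version B (the rewrite author's own statement) =====
-- stated objective: alternative
-- what changed: Replaces A's stateful round-robin walk that destructively removes characters from matrix rows one at a time with a two-pass decomposition: first bucket the string's characters per matrix row (i % len(matrix)), then check each row's demand is a sub-multiset of the row's contents by comparing counts; B does not mutate matrix.
import Mathlib
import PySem

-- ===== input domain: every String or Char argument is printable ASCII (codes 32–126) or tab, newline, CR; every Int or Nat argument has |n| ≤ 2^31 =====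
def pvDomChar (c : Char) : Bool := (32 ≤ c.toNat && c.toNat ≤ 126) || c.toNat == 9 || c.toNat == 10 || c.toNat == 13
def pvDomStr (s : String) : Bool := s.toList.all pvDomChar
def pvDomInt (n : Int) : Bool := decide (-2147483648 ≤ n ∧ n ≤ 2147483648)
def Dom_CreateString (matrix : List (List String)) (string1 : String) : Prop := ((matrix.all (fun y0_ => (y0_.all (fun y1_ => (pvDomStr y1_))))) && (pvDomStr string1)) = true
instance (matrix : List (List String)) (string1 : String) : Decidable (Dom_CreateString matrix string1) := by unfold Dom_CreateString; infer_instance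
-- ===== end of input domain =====

-- B replaces A's stateful round-robin walk (which destructively removes characters from
-- matrix rows) by a two-pass decomposition: bucket the string's characters per row, then
-- check each row's demand is a sub-multiset of the row by count comparison.  A mutates
-- `matrix` in place; B does not — the equivalence claimed is about the return value only.

-- ===== PORT A =====
-- the `for character in string1` loop; state = (possibly mutated) matrix and row index
def CreateStringLoop (matrix : List (List String)) (row : Nat) : List Char → String
  | [] => "YES"
  | c :: rest =>
    let character := String.ofList [c]
    let check := PySem.List.count (matrix.getD row []) character
    if check ≠ 0 then
      CreateStringLoop
        (matrix.set row ((PySem.List.remove? (matrix.getD row []) character).getD (matrix.getD row [])))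
        ((row + 1) % matrix.length) rest
    else "NO"

def CreateString (matrix : List (List String)) (string1 : String) : String :=
  CreateStringLoop matrix 0 string1.toList

-- ===== PORT B =====
def CreateString_alt (matrix : List (List String)) (string1 : String) : String :=
  let chars := string1.toList
  if chars.isEmpty then "YES"
  else
    let n := matrix.length
    -- pass 1: bucket each character into its row i % n
    let buckets := (PySem.List.enumerate chars).foldl
      (fun bs p => bs.set (p.1.toNat % n) (bs.getD (p.1.toNat % n) [] ++ [p.2]))
      (List.replicate n ([] : List Char))
    -- pass 2: per-row sub-multiset check by counts (early NO = any)
    if (PySem.List.enumerate buckets).any (fun p =>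
        (PySem.Set.ofList p.2).any (fun ch =>
          decide (PySem.List.count p.2 ch > PySem.List.count (matrix.getD p.1.toNat []) (String.ofList [ch]))))
    then "NO" else "YES"

-- ===== PRECONDITION & SPEC =====
-- Pre_ excludes only the inputs where A raises: a nonempty string1 with an empty matrix
-- (matrix[0] raises IndexError there).
def Pre_CreateString (matrix : List (List String)) (string1 : String) : Prop :=
  string1 = "" ∨ matrix ≠ []
instance (matrix : List (List String)) (string1 : String) : Decidable (Pre_CreateString matrix string1) := by unfold Pre_CreateString; infer_instance

def pvWitness_CreateString : List (List String) × String := ([["a", "b"], ["c"]], "ba")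

def Spec_CreateString (matrix : List (List String)) (string1 : String) (out : String) : Prop := out = CreateString_alt matrix string1
instance (matrix : List (List String)) (string1 : String) (out : String) : Decidable (Spec_CreateString matrix string1 out) := by unfold Spec_CreateString; infer_instance

-- ===== CLAIM (what is proved, stated in full; the proofs are below) =====
def Claim_equal_CreateString : Prop := ∀ (matrix : List (List String)) (string1 : String), Dom_CreateString matrix string1 → Pre_CreateString matrix string1 → Spec_CreateString matrix string1 (CreateString matrix string1)

-- ===== LEMMAS AND PROOFS =====

-- demand row n r chars = the characters of chars that the round-robin walk starting at
-- row `row` (subsequent indices taken mod n) assigns to row r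
def demand (row n r : Nat) : List Char → List Char
  | [] => []
  | c :: rest => (if row = r then [c] else []) ++ demand ((row + 1) % n) n r rest

-- sub-multiset test by counts: each needed character occurs in hv at least as often
def subCnt (need : List Char) (hv : List String) : Bool :=
  need.all (fun x => need.count x ≤ List.count (String.ofList [x]) hv)

theorem ofList_singleton_inj {a b : Char} (h : String.ofList [a] = String.ofList [b]) : a = b := by
  have := congrArg String.toList h
  simpa using this

theorem allCongr {α : Type} (l : List α) (p q : α → Bool) (h : ∀ x ∈ l, p x = q x) :
    l.all p = l.all q := by
  induction l with
  | nil => rfl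
  | cons a t ih =>
    simp only [List.all_cons]
    rw [h a (List.mem_cons_self), ih (fun x hx => h x (List.mem_cons_of_mem a hx))]

theorem subCnt_cons (c : Char) (d : List Char) (hv : List String)
    (hmem : String.ofList [c] ∈ hv) :
    subCnt (c :: d) hv = subCnt d (hv.erase (String.ofList [c])) := by
  have hc1 : 1 ≤ List.count (String.ofList [c]) hv := List.one_le_count_iff.mpr hmem
  rw [Bool.eq_iff_iff]
  unfold subCnt
  simp only [List.all_eq_true, List.mem_cons, decide_eq_true_eq]
  constructor
  · intro h x hx
    by_cases hxc : x = c
    · subst hxc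
      have := h x (Or.inl rfl)
      rw [List.count_erase_self]
      simp only [List.count_cons_self] at this
      omega
    · have hne : String.ofList [x] ≠ String.ofList [c] := fun he => hxc (ofList_singleton_inj he)
      rw [List.count_erase_of_ne hne]
      have := h x (Or.inr hx)
      rw [List.count_cons_of_ne (fun he => hxc he.symm)] at this
      exact this
  · intro h x hx
    rcases hx with rfl | hx
    · rw [List.count_cons_self]
      by_cases hmemd : x ∈ d
      · have := h x hmemd
        rw [List.count_erase_self] at this
        omega
      · rw [List.count_eq_zero_of_not_mem hmemd]
        omega
    · by_cases hxc : x = c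
      · subst hxc
        have := h x hx
        rw [List.count_erase_self] at this
        rw [List.count_cons_self]
        omega
      · rw [List.count_cons_of_ne (fun he => hxc he.symm)]
        have := h x hx
        rw [List.count_erase_of_ne (fun he => hxc (ofList_singleton_inj he))] at this
        exact this

-- A's loop answers YES exactly when every row's demanded characters form a
-- sub-multiset of the row's (current) contents
theorem loop_eq (chars : List Char) : ∀ (matrix : List (List String)) (row : Nat),
    row < matrix.length →
    CreateStringLoop matrix row chars =
      (if (List.range matrix.length).all
            (fun r => subCnt (demand row matrix.length r chars) (matrix.getD r [])) then "YES" else "NO") := by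
  induction chars with
  | nil =>
    intro matrix row hrow
    simp [CreateStringLoop, demand, subCnt]
  | cons c rest ih =>
    intro matrix row hrow
    set s := String.ofList [c] with hs
    by_cases hchk : PySem.List.count (matrix.getD row []) s = 0
    · -- character missing: A returns NO, the condition fails at r = row
      have hcnt0 : List.count s (matrix.getD row []) = 0 := by
        rw [PySem.List.count_eq] at hchk; exact hchk
      have hfail : ¬ (subCnt (demand row matrix.length row (c :: rest)) (matrix.getD row []) = true) := by
        unfold subCnt
        rw [List.all_eq_true]
        intro h
        have hcmem : c ∈ demand row matrix.length row (c :: rest) := by simp [demand]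
        have h2 := h c hcmem
        rw [decide_eq_true_iff, ← hs, hcnt0] at h2
        have hpos : 1 ≤ List.count c (demand row matrix.length row (c :: rest)) :=
          List.one_le_count_iff.mpr hcmem
        omega
      have hallf : (List.range matrix.length).all
          (fun r => subCnt (demand row matrix.length r (c :: rest)) (matrix.getD r [])) = false := by
        rw [List.all_eq_false]
        exact ⟨row, List.mem_range.mpr hrow, hfail⟩
      have hno : CreateStringLoop matrix row (c :: rest) = "NO" := by
        simp only [CreateStringLoop]
        rw [if_neg (show ¬(PySem.List.count (matrix.getD row []) (String.ofList [c]) ≠ 0) from by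
          rw [← hs]; exact not_not.mpr hchk)]
      rw [hno, hallf]
      simp
    · -- character present: remove it and recurse
      have hmem : s ∈ matrix.getD row [] := by
        rw [PySem.List.count_eq] at hchk
        exact List.count_pos_iff.mp (Nat.pos_of_ne_zero hchk)
      have hrm : PySem.List.remove? (matrix.getD row []) s = some ((matrix.getD row []).erase s) :=
        PySem.List.remove?_eq_some_erase _ _ hmem
      have hn : 0 < matrix.length := Nat.lt_of_le_of_lt (Nat.zero_le _) hrow
      have hstep : CreateStringLoop matrix row (c :: rest) =
          CreateStringLoop (matrix.set row ((matrix.getD row []).erase s)) ((row + 1) % matrix.length) rest := by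
        simp only [CreateStringLoop]
        rw [if_pos (show (PySem.List.count (matrix.getD row []) (String.ofList [c]) ≠ 0) from by
          rw [← hs]; exact hchk)]
        rw [show String.ofList [c] = s from hs.symm, hrm]
        rfl
      have hcond : ((List.range matrix.length).all fun r =>
          subCnt (demand ((row + 1) % matrix.length) matrix.length r rest)
            ((matrix.set row ((matrix.getD row []).erase s)).getD r []))
          = ((List.range matrix.length).all fun r =>
          subCnt (demand row matrix.length r (c :: rest)) (matrix.getD r [])) := by
        apply allCongr
        intro r hr
        by_cases hrrow : r = row
        · subst hrrow
          have hget : (matrix.set r ((matrix.getD r []).erase s)).getD r [] = (matrix.getD r []).erase s := by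
            rw [List.getD_eq_getElem?_getD, List.getElem?_set_self (by exact hrow)]
            rfl
          rw [hget, show demand r matrix.length r (c :: rest)
              = c :: demand ((r + 1) % matrix.length) matrix.length r rest by simp [demand]]
          exact (subCnt_cons c _ _ hmem).symm
        · have hget : (matrix.set row ((matrix.getD row []).erase s)).getD r [] = matrix.getD r [] := by
            rw [List.getD_eq_getElem?_getD, List.getElem?_set_ne (by omega), ← List.getD_eq_getElem?_getD]
          rw [hget, show demand row matrix.length r (c :: rest)
              = demand ((row + 1) % matrix.length) matrix.length r rest by simp [demand, hrrow, Ne.symm]]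
      rw [hstep, ih _ _ (by rw [List.length_set]; exact Nat.mod_lt _ hn), List.length_set, hcond]

theorem buckets_length (n : Nat) (chars : List Char) : ∀ (s : Int) (bs : List (List Char)),
    ((PySem.List.enumerate chars s).foldl
      (fun bs p => bs.set (p.1.toNat % n) (bs.getD (p.1.toNat % n) [] ++ [p.2])) bs).length
      = bs.length := by
  induction chars with
  | nil => intro s bs; simp [PySem.List.enumerate_nil]
  | cons c rest ih =>
    intro s bs
    rw [PySem.List.enumerate_cons]
    simp only [List.foldl_cons]
    rw [ih]
    simp

-- B's bucket fold collects exactly the round-robin demands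
theorem buckets_getD (n : Nat) (hn : 0 < n) (chars : List Char) : ∀ (s : Nat) (bs : List (List Char)),
    bs.length = n → ∀ r,
    ((PySem.List.enumerate chars (s : Int)).foldl
      (fun bs p => bs.set (p.1.toNat % n) (bs.getD (p.1.toNat % n) [] ++ [p.2])) bs).getD r []
      = bs.getD r [] ++ demand (s % n) n r chars := by
  induction chars with
  | nil => intro s bs hlen r; simp [PySem.List.enumerate_nil, demand]
  | cons c rest ih =>
    intro s bs hlen r
    rw [PySem.List.enumerate_cons]
    simp only [List.foldl_cons]
    have hcast : (s : Int) + 1 = ((s + 1 : Nat) : Int) := by push_cast; ring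
    rw [hcast, ih (s + 1) _ (by rw [List.length_set]; exact hlen)]
    have htoNat : ((s : Int)).toNat = s := Int.toNat_natCast s
    rw [htoNat]
    have hmodlt : s % n < bs.length := by rw [hlen]; exact Nat.mod_lt _ hn
    have hmod : (s % n + 1) % n = (s + 1) % n := by
      conv_rhs => rw [Nat.add_mod]
      rw [Nat.add_mod (s % n) 1, Nat.mod_mod_of_dvd _ (dvd_refl n)]
    rw [show demand (s % n) n r (c :: rest)
        = (if s % n = r then [c] else []) ++ demand ((s % n + 1) % n) n r rest from rfl, hmod]
    by_cases hr : s % n = r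
    · have hget : (bs.set (s % n) (bs.getD (s % n) [] ++ [c])).getD r []
          = bs.getD r [] ++ [c] := by
        rw [← hr, List.getD_eq_getElem?_getD, List.getElem?_set_self hmodlt]
        rfl
      rw [hget, if_pos hr, List.append_assoc]
    · have hget : (bs.set (s % n) (bs.getD (s % n) [] ++ [c])).getD r [] = bs.getD r [] := by
        rw [List.getD_eq_getElem?_getD, List.getElem?_set_ne (by omega), ← List.getD_eq_getElem?_getD]
      rw [hget, if_neg hr, List.nil_append]

-- B's inner any over set(need) is the negation of the sub-multiset test
theorem notSub (need : List Char) (hv : List String) :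
    ((PySem.Set.ofList need).any (fun ch =>
      decide (PySem.List.count need ch > PySem.List.count hv (String.ofList [ch]))))
      = ! subCnt need hv := by
  rw [Bool.eq_iff_iff]
  simp only [List.any_eq_true, Bool.not_eq_true', List.all_eq_false, subCnt,
    PySem.Set.mem_ofList, decide_eq_true_iff, PySem.List.count_eq, gt_iff_lt]
  constructor <;> rintro ⟨x, hm, h⟩ <;> exact ⟨x, hm, by omega⟩

-- ===== VERDICT (by name: the statement is the Claim_ definition above) =====
theorem CreateString_spec : Claim_equal_CreateString := by
  intro matrix string1 hdom hpre
  unfold Spec_CreateString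
  by_cases hnil : string1.toList = []
  · unfold CreateString CreateString_alt
    rw [hnil]
    simp [CreateStringLoop]
  · have hm : matrix ≠ [] := by
      rcases hpre with h | h
      · exact absurd (by rw [h]; rfl) hnil
      · exact h
    have hn : 0 < matrix.length := List.length_pos_iff.mpr hm
    unfold CreateString CreateString_alt
    rw [loop_eq string1.toList matrix 0 hn]
    rw [if_neg (show ¬(string1.toList.isEmpty = true) from by simp [List.isEmpty_iff, hnil])]
    set chars := string1.toList with hc
    set n := matrix.length with hnn
    set b := (PySem.List.enumerate chars).foldl
      (fun bs p => bs.set (p.1.toNat % n) (bs.getD (p.1.toNat % n) [] ++ [p.2]))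
      (List.replicate n ([] : List Char)) with hb
    have hblen : b.length = n := by rw [hb, buckets_length]; simp
    have hbget : ∀ r, b.getD r [] = demand 0 n r chars := by
      intro r
      rw [hb, show ((0 : Int)) = ((0 : Nat) : Int) from rfl,
        buckets_getD n hn chars 0 _ (by simp), Nat.zero_mod]
      simp [List.getD_eq_getElem?_getD, List.getElem?_replicate]
      split <;> rfl
    have hany : ((PySem.List.enumerate b).any fun p =>
        (PySem.Set.ofList p.2).any (fun ch =>
          decide (PySem.List.count p.2 ch > PySem.List.count (matrix.getD p.1.toNat []) (String.ofList [ch]))))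
        = !((List.range n).all (fun r => subCnt (demand 0 n r chars) (matrix.getD r []))) := by
      by_cases hall : ((List.range n).all (fun r => subCnt (demand 0 n r chars) (matrix.getD r []))) = true
      · rw [hall, Bool.not_true]
        rw [List.any_eq_false]
        intro p hp
        obtain ⟨k, hk, rfl⟩ := (PySem.List.mem_enumerate_iff b 0 p).mp hp
        have hkn : k < n := hblen ▸ hk
        simp only [show ((0 : Int) + (k : Int)).toNat = k from by simp, notSub,
          show b[k] = b.getD k [] from (List.getD_eq_getElem b [] hk).symm, hbget k]
        rw [List.all_eq_true] at hall
        rw [hall _ (List.mem_range.mpr hkn)]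
        simp
      · have hallf := eq_false_of_ne_true hall
        rw [hallf, Bool.not_false]
        rw [List.any_eq_true]
        rw [List.all_eq_false] at hallf
        obtain ⟨r, hr, hgf⟩ := hallf
        have hrn : r < n := List.mem_range.mp hr
        have hrb : r < b.length := by omega
        refine ⟨((0 : Int) + (r : Int), b[r]), (PySem.List.mem_enumerate_iff b 0 _).mpr ⟨r, hrb, rfl⟩, ?_⟩
        simp only [show ((0 : Int) + (r : Int)).toNat = r from by simp, notSub,
          show b[r] = b.getD r [] from (List.getD_eq_getElem b [] hrb).symm, hbget r]
        rw [eq_false_of_ne_true hgf]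
        simp
    show (if ((List.range n).all fun r => subCnt (demand 0 n r chars) (matrix.getD r [])) = true then "YES" else "NO")
      = (if ((PySem.List.enumerate b).any fun p =>
          (PySem.Set.ofList p.2).any fun ch =>
            decide (PySem.List.count p.2 ch > PySem.List.count (matrix.getD p.1.toNat []) (String.ofList [ch]))) = true
         then "NO" else "YES")
    rw [hany]
    by_cases hall : ((List.range n).all (fun r => subCnt (demand 0 n r chars) (matrix.getD r []))) = true
    · rw [hall]; rfl
    · rw [eq_false_of_ne_true hall]; rfl
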